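-- pv_equiv track=rewrite | github.com/getuliojql/if672 | lista03/desafio03.py | char_to_num
-- ===== SOURCE A (Python) =====
-- def char_to_num(c):
--     alphabet = 'ABCDEFGHIJKLMNOPQRSTUVWXYZ'
--     i = 0
--
--     while i < 26:
--         if alphabet[i] == c:
--             return i + 1
--         i += 1
--
--     return 0
-- ===== SOURCE B (Python) =====
-- def char_to_num(c):
--     # closed form: rank of an uppercase letter computed arithmetically, no scan
--     if isinstance(c, str) and len(c) == 1 and 'A' <= c <= 'Z':
--         return ord(c) - ord('A') + 1
--     return 0
-- ===== Notes on version B (the rewrite author's own statement) =====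
-- stated objective: idiomatic
-- what changed: Replaces the 26-step linear scan over the alphabet string with a closed-form arithmetic rank (character code minus 64) guarded by a single uppercase range check.
import Mathlib
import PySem

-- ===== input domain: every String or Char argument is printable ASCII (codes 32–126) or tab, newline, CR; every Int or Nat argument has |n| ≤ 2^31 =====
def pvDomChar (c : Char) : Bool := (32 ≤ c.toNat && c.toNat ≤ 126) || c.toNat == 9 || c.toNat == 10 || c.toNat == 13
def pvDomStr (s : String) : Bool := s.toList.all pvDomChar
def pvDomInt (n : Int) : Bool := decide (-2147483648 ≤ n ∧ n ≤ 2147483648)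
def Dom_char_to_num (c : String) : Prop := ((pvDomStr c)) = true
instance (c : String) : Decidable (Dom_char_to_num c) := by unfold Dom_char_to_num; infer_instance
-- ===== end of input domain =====

-- B replaces A's 26-step scan over the alphabet string with a closed-form arithmetic rank (idiomatic, O(1)).


-- ===== PORT A =====
-- the while loop: i from 0 while i < 26; 'alphabet[i] == c' compares the one-char string at index i with c
def charToNumGo (c : List Char) (i : Nat) : Int :=
  if _h : i < 26 then
    if c = ["ABCDEFGHIJKLMNOPQRSTUVWXYZ".toList.getD i ' '] then (i : Int) + 1
    else charToNumGo c (i + 1)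
  else 0
termination_by 26 - i

def char_to_num (c : String) : Int := charToNumGo c.toList 0

-- ===== PORT B =====
def char_to_num_alt (c : String) : Int :=
  match c.toList with
  | [ch] => if 'A' ≤ ch ∧ ch ≤ 'Z' then (ch.toNat : Int) - 64 else 0
  | _ => 0

-- ===== PRECONDITION & SPEC =====
def Spec_char_to_num (c : String) (out : Int) : Prop := out = char_to_num_alt c
instance (c : String) (out : Int) : Decidable (Spec_char_to_num c out) := by unfold Spec_char_to_num; infer_instance

-- ===== CLAIM (what is proved, stated in full; the proofs are below) =====
def Claim_equal_char_to_num : Prop := ∀ (c : String), Dom_char_to_num c → Spec_char_to_num c (char_to_num c)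

-- ===== LEMMAS AND PROOFS =====

theorem alph_getD (i : Nat) (hi : i < 26) :
    "ABCDEFGHIJKLMNOPQRSTUVWXYZ".toList.getD i ' ' = Char.ofNat (65 + i) := by
  interval_cases i <;> decide

theorem toNat_ofNat_valid (n : Nat) (hn : n < 55296) : (Char.ofNat n).toNat = n := by
  have hv : Nat.isValidChar n := Or.inl hn
  simp only [Char.ofNat, dif_pos hv, Char.ofNatAux, Char.toNat, UInt32.toNat, BitVec.toNat_ofNatLT]

theorem char_eq_ofNat_iff (ch : Char) (n : Nat) (hn : n < 55296) :
    ch = Char.ofNat n ↔ ch.toNat = n := by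
  constructor
  · rintro rfl
    exact toNat_ofNat_valid n hn
  · rintro rfl
    exact (Char.ofNat_toNat ch).symm

theorem go_nonsingle (cs : List Char) (h : ∀ x : Char, cs ≠ [x]) :
    ∀ n i, i + n = 26 → charToNumGo cs i = 0 := by
  intro n
  induction n with
  | zero => intro i hi; unfold charToNumGo; simp [show ¬ i < 26 by omega]
  | succ k ih =>
    intro i hi
    unfold charToNumGo
    simp only [show i < 26 from by omega, dif_pos]
    rw [if_neg (h _), ih (i + 1) (by omega)]

theorem go_single (ch : Char) :
    ∀ n i, i + n = 26 → charToNumGo [ch] i =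
      if 65 + i ≤ ch.toNat ∧ ch.toNat ≤ 90 then (ch.toNat : Int) - 64 else 0 := by
  intro n
  induction n with
  | zero =>
    intro i hi
    unfold charToNumGo
    simp [show ¬ i < 26 by omega, show ¬ (65 + i ≤ ch.toNat ∧ ch.toNat ≤ 90) by omega]
  | succ k ih =>
    intro i hi
    unfold charToNumGo
    simp only [show i < 26 from by omega, dif_pos]
    rw [alph_getD i (by omega)]
    by_cases hc : ch = Char.ofNat (65 + i)
    · have hn : ch.toNat = 65 + i := (char_eq_ofNat_iff ch (65+i) (by omega)).mp hc
      rw [if_pos (by rw [hc]), if_pos (by omega)]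
      omega
    · have hn : ch.toNat ≠ 65 + i := fun h => hc ((char_eq_ofNat_iff ch (65+i) (by omega)).mpr h)
      rw [if_neg (by simpa using hc), ih (i+1) (by omega)]
      by_cases h1 : 65 + (i+1) ≤ ch.toNat ∧ ch.toNat ≤ 90
      · rw [if_pos h1, if_pos (by omega)]
      · rw [if_neg h1, if_neg (by omega)]

theorem le_char_iff (a b : Char) : a ≤ b ↔ a.toNat ≤ b.toNat := Iff.rfl

-- ===== VERDICT (by name: the statement is the Claim_ definition above) =====
theorem char_to_num_spec : Claim_equal_char_to_num := by
  intro c _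
  unfold Spec_char_to_num char_to_num char_to_num_alt
  match h : c.toList with
  | [] => rw [go_nonsingle _ (by simp) 26 0 rfl]
  | [ch] =>
    rw [go_single ch 26 0 rfl]
    show _ = if 'A' ≤ ch ∧ ch ≤ 'Z' then ((ch.toNat : Int) - 64) else 0
    have eA : 'A'.toNat = 65 := rfl
    have eZ : 'Z'.toNat = 90 := rfl
    by_cases hn : 65 + 0 ≤ ch.toNat ∧ ch.toNat ≤ 90
    · rw [if_pos hn,
        if_pos ⟨(le_char_iff 'A' ch).mpr (by omega), (le_char_iff ch 'Z').mpr (by omega)⟩]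
    · rw [if_neg hn, if_neg ?_]
      intro ⟨ha, hb⟩
      have ha' := (le_char_iff 'A' ch).mp ha
      have hb' := (le_char_iff ch 'Z').mp hb
      omega
  | a :: b :: t => rw [go_nonsingle _ (by simp) 26 0 rfl]
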